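-- pv_equiv track=rewrite | github.com/haiqiang-zhang/UOA_compsci101 | Assignment3/A3_Q8_GetDiceScore.py | get_dice_score
-- ===== SOURCE A (Python) =====
-- def get_dice_score(list_of_dice):
--     result = 0
--     number_list = []
--     number_list_number = 0
--     for number in range(1,7):
--         for index in range(len(list_of_dice)):
--             if list_of_dice[index] == number:
--                 number_list_number = number_list_number + 1
--         number_list.append(number_list_number)
--         number_list_number = 0
--     while True:
--         if 0 in number_list:
--             number_list = number_list[:number_list.index(0)]
--         number_list.reverse()
--         if len(number_list) != 0:
--             min_number = min(number_list)
--             min_index = number_list.index(min_number)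
--             for index in range(1,len(number_list)+1):
--                 result = result + index*min_number
--             for index in range(len(number_list)):
--                 number_list[index] = number_list[index]-min_number
--             number_list.reverse()
--         else:
--             break
--     return result
-- ===== SOURCE B (Python) =====
-- def get_dice_score(list_of_dice):
--     result = 0
--     running = len(list_of_dice)
--     for k in range(1, 7):
--         running = min(running, list_of_dice.count(k))
--         result += k * running
--     return result
-- ===== Notes on version B (the rewrite author's own statement) =====
-- stated objective: simpler
-- what changed: Replaces the count-then-repeatedly-truncate/reverse/peel-min-layers while-loop with the closed form result = sum over k=1..6 of k*min(count(1),...,count(k)), computed in one running-minimum pass; counting uses list.count instead of an index loop.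
import Mathlib
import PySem

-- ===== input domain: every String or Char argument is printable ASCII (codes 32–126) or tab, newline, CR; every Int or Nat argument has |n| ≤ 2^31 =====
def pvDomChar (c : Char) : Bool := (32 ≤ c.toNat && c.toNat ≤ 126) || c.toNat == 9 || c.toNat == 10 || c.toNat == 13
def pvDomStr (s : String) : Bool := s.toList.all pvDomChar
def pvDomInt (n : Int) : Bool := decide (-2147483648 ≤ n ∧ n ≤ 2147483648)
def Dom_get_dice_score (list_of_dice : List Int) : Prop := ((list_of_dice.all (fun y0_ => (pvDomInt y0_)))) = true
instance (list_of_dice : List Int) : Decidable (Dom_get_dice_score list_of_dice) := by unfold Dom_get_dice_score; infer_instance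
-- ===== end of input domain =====

-- B replaces A's count-then-peel-min-layers while loop by the closed form
-- Σ_{k=1..6} k·min(count 1, …, count k), one running-minimum pass (objective: simpler).

-- ===== PORT A =====
-- the while loop; A's list always has length 6 and each productive iteration puts a 0
-- into it which the next truncation removes, so it runs at most 7 times: fuel 8 is a
-- totality guard only, never reached (proved in the lemmas below)
def dsLoop : Nat → List Int → Int → Int
  | 0, _, result => result
  | fuel+1, number_list, result =>
    -- if 0 in number_list: number_list = number_list[:number_list.index(0)]
    let nl1 := if number_list.contains 0 then
                 PySem.List.slice number_list none
                   (some (((PySem.List.index? number_list 0).getD 0 : Nat) : Int))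
               else number_list
    -- number_list.reverse()
    let nl2 := nl1.reverse
    if nl2.length ≠ 0 then
      -- min(number_list); the .getD 0 is a totality guard only: min? of a nonempty
      -- list is always some (min_index is computed by A but never used)
      let min_number := (PySem.List.min? nl2 (fun y => y)).getD 0
      -- for index in range(1, len+1): result += index*min_number
      let result := (PySem.List.pyRange 1 ((nl2.length : Int)+1) 1).foldl
                      (fun r index => r + index * min_number) result
      -- for index in range(len): number_list[index] -= min_number
      -- (each slot is written once from its own old value: elementwise subtraction)
      let nl3 := nl2.map (fun x => x - min_number)
      dsLoop fuel nl3.reverse result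
    else result

def get_dice_score (list_of_dice : List Int) : Int :=
  let number_list := (PySem.List.pyRange 1 7 1).foldl (fun nl number =>
      let number_list_number := (PySem.List.pyRange 0 (list_of_dice.length : Int) 1).foldl
          (fun acc index => if PySem.List.pyGetD list_of_dice index 0 == number then acc + 1 else acc)
          (0 : Int)
      nl ++ [number_list_number]) ([] : List Int)
  dsLoop 8 number_list 0

-- ===== PORT B =====
def get_dice_score_alt (list_of_dice : List Int) : Int :=
  ((PySem.List.pyRange 1 7 1).foldl (fun (p : Int × Int) k =>
      let running := min p.2 (PySem.List.count list_of_dice k)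
      (p.1 + k * running, running)) ((0 : Int), (list_of_dice.length : Int))).1

-- ===== PRECONDITION & SPEC =====
def Spec_get_dice_score (list_of_dice : List Int) (out : Int) : Prop := out = get_dice_score_alt list_of_dice
instance (list_of_dice : List Int) (out : Int) : Decidable (Spec_get_dice_score list_of_dice out) := by unfold Spec_get_dice_score; infer_instance

-- ===== CLAIM (what is proved, stated in full; the proofs are below) =====
def Claim_equal_get_dice_score : Prop := ∀ (list_of_dice : List Int), Dom_get_dice_score list_of_dice → Spec_get_dice_score list_of_dice (get_dice_score list_of_dice)

-- ===== LEMMAS AND PROOFS =====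

-- G cs k m = Σ_i (k+i)·(running min of m,c₀,…,cᵢ): the value both programs compute
def G : List Int → Int → Int → Int
  | [], _, _ => 0
  | x :: xs, k, m => k * (min m x) + G xs (k+1) (min m x)

-- T n k = k + (k+1) + … + (k+n-1)
def T : Nat → Int → Int
  | 0, _ => 0
  | n+1, k => k + T n (k+1)

theorem G_append (t u : List Int) : ∀ (k m : Int),
    G (t ++ u) k m = G t k m + G u (k + t.length) (t.foldl min m) := by
  induction t with
  | nil => intro k m; simp [G, List.foldl]
  | cons x xs ih =>
    intro k m
    simp only [List.cons_append, G, List.foldl, List.length_cons, ih]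
    push_cast; ring_nf

theorem G_zero (nl : List Int) : ∀ (k : Int), (∀ x ∈ nl, 0 ≤ x) → G nl k 0 = 0 := by
  induction nl with
  | nil => intro k _; rfl
  | cons x xs ih =>
    intro k h
    have hx : 0 ≤ x := h x (by simp)
    have hmin : min (0 : Int) x = 0 := by omega
    simp only [G, hmin, ih (k+1) (fun y hy => h y (by simp [hy]))]
    ring

theorem G_sub (c : Int) (nl : List Int) : ∀ (k m : Int),
    G (nl.map (fun x => x - c)) k (m - c) = G nl k m - c * T nl.length k := by
  induction nl with
  | nil => intro k m; simp [G, T]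
  | cons x xs ih =>
    intro k m
    have hmin : min (m - c) (x - c) = min m x - c := by omega
    simp only [List.map_cons, G, hmin, List.length_cons, T, ih (k+1) (min m x)]
    ring

theorem sum_pyRange_mul (n : Nat) : ∀ (a res c : Int),
    (PySem.List.pyRange a (a + n) 1).foldl (fun r index => r + index * c) res
      = res + c * T n a := by
  induction n with
  | zero => intro a res c; simp [PySem.List.pyRange_one_eq_nil, T]
  | succ n ih =>
    intro a res c
    push_cast
    rw [show a + ((n : Int) + 1) = (a + 1) + n by ring,
        PySem.List.pyRange_one_cons (by omega)]
    simp only [List.foldl, T, ih]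
    ring

theorem foldl_min_le_init (l : List Int) : ∀ (a : Int), l.foldl min a ≤ a := by
  induction l with
  | nil => intro a; exact le_refl a
  | cons y l ih =>
    intro a
    have := ih (min a y)
    simp only [List.foldl]
    omega

theorem foldl_min_le_mem (l : List Int) : ∀ (a x : Int), x ∈ l → l.foldl min a ≤ x := by
  induction l with
  | nil => intro a x hx; cases hx
  | cons y l ih =>
    intro a x hx
    rcases List.mem_cons.mp hx with h | h
    · subst h
      have := foldl_min_le_init l (min a x)
      simp only [List.foldl]
      omega
    · exact ih (min a y) x h

theorem foldl_min_ge (l : List Int) : ∀ (a b : Int), (∀ x ∈ l, b ≤ x) → b ≤ a →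
    b ≤ l.foldl min a := by
  induction l with
  | nil => intro a b _ hba; exact hba
  | cons y l ih =>
    intro a b h hba
    have hy : b ≤ y := h y (by simp)
    exact ih (min a y) b (fun x hx => h x (by simp [hx])) (by omega)

theorem foldl_min_mem (l : List Int) : ∀ (a : Int), l.foldl min a = a ∨ l.foldl min a ∈ l := by
  induction l with
  | nil => intro a; left; rfl
  | cons y l ih =>
    intro a
    rcases ih (min a y) with h | h
    · simp only [List.foldl, h]
      rcases (show a ≤ y ∨ y < a by omega) with hle | hlt
      · left; omega
      · right
        rw [show min a y = y by omega]
        exact List.mem_cons_self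
    · right; right; exact h

-- length of the zero-free prefix: the loop's termination measure
def zfp (nl : List Int) : Nat := (nl.takeWhile (fun x => x ≠ 0)).length

theorem zfp_lt_of_mem (nl : List Int) (h : (0 : Int) ∈ nl) : zfp nl < nl.length := by
  unfold zfp
  induction nl with
  | nil => cases h
  | cons x xs ih =>
    by_cases hx : x = 0
    · subst hx; simp
    · rcases List.mem_cons.mp h with h0 | h0
      · exact absurd h0.symm hx
      · simpa [List.takeWhile_cons, hx] using ih h0

theorem zfp_eq_of_split (pre suf : List Int) (hp : (0 : Int) ∉ pre) :
    zfp (pre ++ 0 :: suf) = pre.length := by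
  unfold zfp
  induction pre with
  | nil => simp
  | cons x xs ih =>
    have hx : x ≠ 0 := fun hc => hp (by simp [hc])
    simp only [List.cons_append, List.takeWhile_cons, List.length_cons]
    simp only [hx, if_pos, ne_eq, not_false_eq_true, decide_true]
    rw [List.length_cons, ih (fun hc => hp (List.mem_cons_of_mem _ hc))]

theorem zfp_le (nl : List Int) : zfp nl ≤ nl.length := by
  unfold zfp
  exact (List.takeWhile_sublist _).length_le

theorem zfp_eq_of_not_mem (nl : List Int) (h : (0 : Int) ∉ nl) : zfp nl = nl.length := by
  unfold zfp
  induction nl with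
  | nil => rfl
  | cons x xs ih =>
    have hx : x ≠ 0 := fun hc => h (by simp [hc])
    simp only [List.takeWhile_cons, hx, ne_eq, not_false_eq_true, decide_true, if_true,
      List.length_cons]
    simpa using ih (fun hc => h (List.mem_cons_of_mem _ hc))

-- one truncation step: the zero-free prefix carries all of G
theorem trunc_step (nl : List Int) (m : Int) (h : ∀ x ∈ nl, 0 ≤ x ∧ x ≤ m) (hm : 0 ≤ m) :
    ∃ t : List Int,
      (if nl.contains 0 then
         PySem.List.slice nl none (some (((PySem.List.index? nl 0).getD 0 : Nat) : Int))
       else nl) = t ∧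
      (∀ x ∈ t, 1 ≤ x ∧ x ≤ m) ∧ zfp nl = t.length ∧ G nl 1 m = G t 1 m := by
  by_cases hc : (0 : Int) ∈ nl
  · have hsome : (PySem.List.index? nl 0).isSome := (PySem.List.index?_isSome_iff nl 0).mpr hc
    obtain ⟨k, hk⟩ := Option.isSome_iff_exists.mp hsome
    obtain ⟨pre, suf, hsplit, hlen, hnot⟩ := (PySem.List.index?_eq_some_iff nl 0 k).mp hk
    refine ⟨pre, ?_, ?_, ?_, ?_⟩
    · rw [if_pos (by simpa [List.contains_iff_mem] using hc), hk]
      simp only [Option.getD_some]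
      rw [PySem.List.slice_to_natCast, hsplit, ← hlen, List.take_left]
    · intro x hx
      have hmem : x ∈ nl := by rw [hsplit]; exact List.mem_append_left _ hx
      have hne : x ≠ 0 := fun hx0 => hnot (hx0 ▸ hx)
      have := h x hmem
      constructor <;> omega
    · rw [hsplit]; exact zfp_eq_of_split pre suf hnot
    · rw [hsplit, G_append]
      have hpre0 : ∀ x ∈ pre, 0 ≤ x := fun x hx =>
        (h x (by rw [hsplit]; exact List.mem_append_left _ hx)).1
      have hsuf0 : ∀ x ∈ suf, 0 ≤ x := fun x hx =>
        (h x (by rw [hsplit]; exact List.mem_append_right _ (List.mem_cons_of_mem _ hx))).1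
      have hr : 0 ≤ pre.foldl min m := foldl_min_ge pre m 0 hpre0 hm
      have hmin0 : min (pre.foldl min m) 0 = 0 := by omega
      simp only [G, hmin0, G_zero suf _ hsuf0]
      ring
  · refine ⟨nl, ?_, ?_, (zfp_eq_of_not_mem nl hc).symm ▸ rfl, rfl⟩
    · rw [if_neg (by simpa [List.contains_iff_mem] using hc)]
    · intro x hx
      have hne : x ≠ 0 := fun hx0 => hc (hx0 ▸ hx)
      have := h x hx
      constructor <;> omega

-- the heart: A's while loop computes G
theorem dsLoop_eq : ∀ (fuel : Nat) (nl : List Int) (res m : Int),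
    (∀ x ∈ nl, 0 ≤ x ∧ x ≤ m) → 0 ≤ m → zfp nl < fuel →
    dsLoop fuel nl res = res + G nl 1 m := by
  intro fuel
  induction fuel with
  | zero => intro nl res m _ _ hf; omega
  | succ fuel ih =>
    intro nl res m h hm hf
    obtain ⟨t, hsel, ht1, hz, hG⟩ := trunc_step nl m h hm
    rw [hG]
    show dsLoop (fuel + 1) nl res = res + G t 1 m
    rw [dsLoop, hsel]
    rcases ht : t.reverse with _ | ⟨y, t2⟩
    · -- t = []: the loop breaks, G t = 0
      have ht' : t = [] := by simpa using congrArg List.reverse ht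
      subst ht'
      simp [G]
    · -- productive iteration
      have hne : t ≠ [] := by
        intro h0; rw [h0] at ht; simp at ht
      have hlen2 : (y :: t2).length ≠ 0 := by simp
      rw [if_pos hlen2, PySem.List.min?_id_cons]
      simp only [Option.getD_some]
      set c := t2.foldl min y with hc
      -- c is the minimum of t
      have hct : c ∈ t := by
        rw [← List.mem_reverse, ht]
        rcases foldl_min_mem t2 y with h0 | h0
        · rw [hc, h0]; exact List.mem_cons_self
        · exact List.mem_cons_of_mem _ h0
      have hcle : ∀ x ∈ t, c ≤ x := by
        intro x hx
        rw [← List.mem_reverse, ht] at hx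
        rcases List.mem_cons.mp hx with h0 | h0
        · subst h0; exact foldl_min_le_init t2 x
        · exact foldl_min_le_mem t2 y x h0
      have hc1 : 1 ≤ c := (ht1 c hct).1
      have hcm : c ≤ m := (ht1 c hct).2
      -- the accumulation loop
      have hlt : (y :: t2).length = t.length := by rw [← ht, List.length_reverse]
      rw [hlt, show ((t.length : Int) + 1) = 1 + t.length by ring, sum_pyRange_mul]
      -- the subtraction, un-reversed
      have hmap : (List.map (fun x => x - c) (y :: t2)).reverse = t.map (fun x => x - c) := by
        rw [← ht, ← List.map_reverse, List.reverse_reverse]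
      rw [hmap]
      -- recursive call
      have hz' : zfp (t.map (fun x => x - c)) < fuel := by
        have h0 : (0 : Int) ∈ t.map (fun x => x - c) :=
          List.mem_map.mpr ⟨c, hct, by ring⟩
        have := zfp_lt_of_mem _ h0
        rw [List.length_map] at this
        omega
      rw [ih (t.map (fun x => x - c)) _ (m - c)
            (by intro x hx
                obtain ⟨x0, hx0, hx0e⟩ := List.mem_map.mp hx
                have := ht1 x0 hx0
                have := hcle x0 hx0
                omega)
            (by omega) hz']
      rw [G_sub c t 1 m]
      ring

-- counts characterisation
theorem counts_eq (l : List Int) :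
    (PySem.List.pyRange 1 7 1).foldl (fun nl number =>
      let c := (PySem.List.pyRange 0 (l.length : Int) 1).foldl
          (fun acc index => if PySem.List.pyGetD l index 0 == number then acc + 1 else acc)
          (0 : Int)
      nl ++ [c]) ([] : List Int)
    = [(PySem.List.count l 1 : Int), (PySem.List.count l 2 : Int), (PySem.List.count l 3 : Int),
       (PySem.List.count l 4 : Int), (PySem.List.count l 5 : Int), (PySem.List.count l 6 : Int)] := by
  have hinner : ∀ v : Int,
      (PySem.List.pyRange 0 (l.length : Int) 1).foldl
        (fun acc index => if PySem.List.pyGetD l index 0 == v then acc + 1 else acc) (0 : Int)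
      = PySem.List.count l v := by
    intro v
    rw [PySem.List.foldl_pyRange_zero_pyGetD' l 0
          (fun acc x => if x == v then acc + 1 else acc) 0,
        PySem.List.foldl_beq_add_one, PySem.List.count_eq]
    omega
  have hr : PySem.List.pyRange 1 7 1 = [1, 2, 3, 4, 5, 6] := by decide
  rw [hr]
  simp only [List.foldl, hinner]
  rfl

-- ===== VERDICT (by name: the statement is the Claim_ definition above) =====
theorem get_dice_score_spec : Claim_equal_get_dice_score := by
  intro l _
  show get_dice_score l = get_dice_score_alt l
  have hbound : ∀ v : Int, 0 ≤ (PySem.List.count l v : Int)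
      ∧ (PySem.List.count l v : Int) ≤ (l.length : Int) := by
    intro v
    rw [PySem.List.count_eq]
    refine ⟨by positivity, ?_⟩
    exact_mod_cast List.count_le_length
  have hA : get_dice_score l
      = 0 + G [(PySem.List.count l 1 : Int), (PySem.List.count l 2 : Int), (PySem.List.count l 3 : Int),
               (PySem.List.count l 4 : Int), (PySem.List.count l 5 : Int), (PySem.List.count l 6 : Int)]
              1 (l.length : Int) := by
    show dsLoop 8 _ 0 = _
    rw [counts_eq l]
    apply dsLoop_eq
    · intro x hx
      simp only [List.mem_cons, List.not_mem_nil, or_false] at hx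
      rcases hx with h|h|h|h|h|h <;> (rw [h]; exact hbound _)
    · positivity
    · have := zfp_le [(PySem.List.count l 1 : Int), (PySem.List.count l 2 : Int), (PySem.List.count l 3 : Int),
               (PySem.List.count l 4 : Int), (PySem.List.count l 5 : Int), (PySem.List.count l 6 : Int)]
      simp only [List.length_cons, List.length_nil] at this
      omega
  rw [hA]
  simp only [get_dice_score_alt,
    show PySem.List.pyRange 1 7 1 = [1, 2, 3, 4, 5, 6] from by decide, List.foldl, G]
  ring
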